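-- pv_equiv track=rewrite | github.com/AdaCore/training_material | pandoc/beamer_filter.py | latex_monoconvert
-- ===== SOURCE A (Python) =====
-- def latex_monoconvert(text):
--     # Taken from Pandoc's stringToLatex
--     replacements = [
--         {
--             "{": "\\{",
--             "}": "\\}",
--         },
--         {
--             "'": "\\textquotesingle{}",
--             "`": "\\textasciigrave{}",
--             "&": "\\&",
--             "<": "\\textless{}",
--             ">": "\\textgreater{}",
--             " ": "\\ ",
--         },
--     ]
--
--     for rs in replacements:
--         r = ""
--         for c in text:
--             r += rs.get(c, c)
--         text = r
--
--     return r
-- ===== SOURCE B (Python) =====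
-- _MERGED = {
--     "{": "\\{",
--     "}": "\\}",
--     "'": "\\textquotesingle{}",
--     "`": "\\textasciigrave{}",
--     "&": "\\&",
--     "<": "\\textless{}",
--     ">": "\\textgreater{}",
--     " ": "\\ ",
-- }
--
--
-- def latex_monoconvert(text):
--     # One merged map (the two maps of the original share no keys, and the
--     # first map's outputs contain no key of the second), single pass.
--     return "".join(_MERGED.get(c, c) for c in text)
-- ===== Notes on version B (the rewrite author's own statement) =====
-- stated objective: simpler
-- what changed: Replaces A's two sequential full traversals (one per replacement dict, rebuilding the string each time with +=) by a single pass over text with one merged dict and str.join; correct because the dicts' key sets are disjoint and the first dict's outputs contain no second-dict keys.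
import Mathlib
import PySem

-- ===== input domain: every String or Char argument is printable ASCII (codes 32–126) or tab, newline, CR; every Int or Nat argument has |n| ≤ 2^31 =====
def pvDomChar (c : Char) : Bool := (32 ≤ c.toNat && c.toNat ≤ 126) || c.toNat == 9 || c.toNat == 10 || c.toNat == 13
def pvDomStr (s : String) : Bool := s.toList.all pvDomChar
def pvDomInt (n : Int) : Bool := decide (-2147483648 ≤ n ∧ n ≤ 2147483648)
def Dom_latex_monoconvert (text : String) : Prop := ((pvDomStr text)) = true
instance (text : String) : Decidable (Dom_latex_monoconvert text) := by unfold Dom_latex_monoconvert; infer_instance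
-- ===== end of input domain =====

-- B does the same escaping in ONE pass over the text with one merged replacement
-- dict, instead of A's two sequential full traversals (one per dict); objective: simpler.

-- ===== PORT A =====
-- the two replacement dict literals of A, in order
def pvRep1 : PySem.Dict Char String := PySem.Dict.mk [('{', "\\{"), ('}', "\\}")]
def pvRep2 : PySem.Dict Char String := PySem.Dict.mk
  [('\'', "\\textquotesingle{}"), ('`', "\\textasciigrave{}"),
   ('&', "\\&"), ('<', "\\textless{}"), ('>', "\\textgreater{}"), (' ', "\\ ")]

-- inner loop of A: r = ""; for c in text: r += rs.get(c, c)  (r kept as List Char, exact for string concat)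
def pvPass (rs : PySem.Dict Char String) (text : String) : String :=
  String.mk (text.toList.foldl (fun r c => r ++ (rs.getD c (String.singleton c)).toList) [])

-- outer loop: for rs in replacements: text = pass(rs, text); A returns the last r, i.e. the final text
def latex_monoconvert (text : String) : String :=
  [pvRep1, pvRep2].foldl (fun t rs => pvPass rs t) text

-- ===== PORT B =====
def pvMerged : PySem.Dict Char String := PySem.Dict.mk
  [('{', "\\{"), ('}', "\\}"),
   ('\'', "\\textquotesingle{}"), ('`', "\\textasciigrave{}"),
   ('&', "\\&"), ('<', "\\textless{}"), ('>', "\\textgreater{}"), (' ', "\\ ")]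

-- "".join(_MERGED.get(c, c) for c in text)
def latex_monoconvert_alt (text : String) : String :=
  String.mk (PySem.Chars.join [] (text.toList.map (fun c => (pvMerged.getD c (String.singleton c)).toList)))

-- ===== PRECONDITION & SPEC =====
def Spec_latex_monoconvert (text : String) (out : String) : Prop := out = latex_monoconvert_alt text
instance (text : String) (out : String) : Decidable (Spec_latex_monoconvert text out) := by unfold Spec_latex_monoconvert; infer_instance

-- ===== CLAIM (what is proved, stated in full; the proofs are below) =====
def Claim_equal_latex_monoconvert : Prop := ∀ (text : String), Dom_latex_monoconvert text → Spec_latex_monoconvert text (latex_monoconvert text)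

-- ===== LEMMAS AND PROOFS =====

def pvG1 (c : Char) : List Char := (pvRep1.getD c (String.singleton c)).toList
def pvG2 (c : Char) : List Char := (pvRep2.getD c (String.singleton c)).toList
def pvGm (c : Char) : List Char := (pvMerged.getD c (String.singleton c)).toList

lemma pvPass_eq_flatMap (rs : PySem.Dict Char String) (text : String) :
    pvPass rs text = String.mk (text.toList.flatMap (fun c => (rs.getD c (String.singleton c)).toList)) := by
  unfold pvPass
  rw [PySem.List.foldl_append_eq_flatMap]
  simp

lemma pvJoin_nil_eq_flatMap (parts : List (List Char)) :
    PySem.Chars.join [] parts = parts.flatten := by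
  induction parts with
  | nil => rfl
  | cons p ps ih =>
    cases ps with
    | nil => simp [PySem.Chars.join, List.intercalate]
    | cons q qs =>
      show List.intercalate [] (p :: q :: qs) = _
      rw [show List.intercalate [] (p::q::qs) = p ++ List.intercalate [] (q::qs) by
        simp [List.intercalate, List.intersperse]]
      simpa [PySem.Chars.join] using ih

-- second-pass of the output of the first pass for one char = merged replacement
lemma pvPerChar (c : Char) : (pvG1 c).flatMap pvG2 = pvGm c := by
  by_cases h1 : c = '{'
  · subst h1; decide
  by_cases h2 : c = '}'
  · subst h2; decide
  have e1 : pvG1 c = [c] := by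
    simp [pvG1, pvRep1, PySem.Dict.getD, PySem.Dict.get?, Ne.symm h1, Ne.symm h2, String.singleton]
  rw [e1]
  simp only [List.flatMap_cons, List.flatMap_nil, List.append_nil]
  simp [pvG2, pvGm, pvRep2, pvMerged, PySem.Dict.getD, PySem.Dict.get?, Ne.symm h1, Ne.symm h2]

lemma pvTwoPass (l : List Char) : (l.flatMap pvG1).flatMap pvG2 = l.flatMap pvGm := by
  induction l with
  | nil => rfl
  | cons c t ih =>
    simp only [List.flatMap_cons, List.flatMap_append, ih, pvPerChar]

-- ===== VERDICT (by name: the statement is the Claim_ definition above) =====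
theorem latex_monoconvert_spec : Claim_equal_latex_monoconvert := by
  intro text _
  show latex_monoconvert text = latex_monoconvert_alt text
  unfold latex_monoconvert latex_monoconvert_alt
  simp only [List.foldl_cons, List.foldl_nil]
  rw [pvPass_eq_flatMap, pvPass_eq_flatMap, pvJoin_nil_eq_flatMap]
  have htl : ∀ x : List Char, (String.mk x).toList = x :=
    fun x => Eq.symm ((fun {l} {s} => String.ofList_eq.mp) rfl)
  rw [htl]
  have := pvTwoPass text.toList
  unfold pvG1 pvG2 pvGm at this
  rw [this, List.flatten_eq_flatMap, List.flatMap_map]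
  simp
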